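-- pv_equiv track=rewrite | github.com/1984bot/simpleGematria | gematria_methods_module.py | getFullReductionGematria
-- ===== SOURCE A (Python) =====
-- def getFullReductionGematria(phrase):
--
--     total = []
--     for n in phrase:
--
--         if n == 'a':
--             total.append(1)
--
--         elif n == 'b':
--             total.append(2)
--
--         elif n == 'c':
--             total.append(3)
--
--         elif n == 'd':
--             total.append(4)
--
--         elif n == 'e':
--             total.append(5)
--
--         elif n == 'f':
--             total.append(6)
--
--         elif n == 'g':
--             total.append(7)
--
--         elif n == 'h':
--             total.append(8)
--
--         elif n == 'i':
--             total.append(9)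
--
--         elif n == 'j':
--             total.append(1)
--
--         elif n == 'k':
--             total.append(2)
--
--         elif n == 'l':
--             total.append(3)
--
--         elif n == 'm':
--             total.append(4)
--
--         elif n == 'n':
--             total.append(5)
--
--         elif n == 'o':
--             total.append(6)
--
--         elif n == 'p':
--             total.append(7)
--
--         elif n == 'q':
--             total.append(8)
--
--         elif n == 'r':
--             total.append(9)
--
--         elif n == 's':
--             total.append(1)
--
--         elif n == 't':
--             total.append(2)
--
--         elif n == 'u':
--             total.append(3)
--
--         elif n == 'v':
--             total.append(4)
--
--         elif n == 'w':
--             total.append(5)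
--
--         elif n == 'x':
--             total.append(6)
--
--         elif n == 'y':
--             total.append(7)
--
--         elif n == 'z':
--             total.append(8)
--
--     sumtotal = sum(total)
--
--
--
--
--
--     return_value = "Full reduction gematria: {}".format(sumtotal)
--     return return_value
-- ===== SOURCE B (Python) =====
-- def getFullReductionGematria(phrase):
--     total = sum(((ord(c) - 97) % 9) + 1 for c in phrase if 'a' <= c <= 'z')
--     return "Full reduction gematria: {}".format(total)
-- ===== Notes on version B (the rewrite author's own statement) =====
-- stated objective: simpler
-- what changed: Replaces the 26-branch elif chain building a list and summing it by a one-line generator sum using the closed form ((ord(c)-97)%9)+1 for lowercase letters.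
import Mathlib
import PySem

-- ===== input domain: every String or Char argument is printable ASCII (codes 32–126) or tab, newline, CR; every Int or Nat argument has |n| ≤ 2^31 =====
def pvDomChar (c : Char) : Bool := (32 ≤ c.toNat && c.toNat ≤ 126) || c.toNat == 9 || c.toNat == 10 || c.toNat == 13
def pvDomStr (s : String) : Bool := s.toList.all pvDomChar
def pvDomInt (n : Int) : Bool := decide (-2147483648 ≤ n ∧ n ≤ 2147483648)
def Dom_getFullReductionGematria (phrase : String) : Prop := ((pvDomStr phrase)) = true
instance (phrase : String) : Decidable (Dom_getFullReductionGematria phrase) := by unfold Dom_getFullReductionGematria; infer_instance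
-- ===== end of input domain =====

-- B replaces A's 26-branch elif chain (build a list of per-letter values, then sum) with a
-- single generator sum using the closed form ((ord(c)-97) % 9) + 1 for lowercase letters (objective: simpler).

-- ===== PORT A =====
-- literal port of A: fold over the characters, each elif branch appends its value to `total`,
-- then sum the list and format the result string.
def getFullReductionGematria (phrase : String) : String :=
  let total : List Int :=
    phrase.toList.foldl (fun total n =>
      if n = 'a' then total ++ [1]
      else if n = 'b' then total ++ [2]
      else if n = 'c' then total ++ [3]
      else if n = 'd' then total ++ [4]
      else if n = 'e' then total ++ [5]
      else if n = 'f' then total ++ [6]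
      else if n = 'g' then total ++ [7]
      else if n = 'h' then total ++ [8]
      else if n = 'i' then total ++ [9]
      else if n = 'j' then total ++ [1]
      else if n = 'k' then total ++ [2]
      else if n = 'l' then total ++ [3]
      else if n = 'm' then total ++ [4]
      else if n = 'n' then total ++ [5]
      else if n = 'o' then total ++ [6]
      else if n = 'p' then total ++ [7]
      else if n = 'q' then total ++ [8]
      else if n = 'r' then total ++ [9]
      else if n = 's' then total ++ [1]
      else if n = 't' then total ++ [2]
      else if n = 'u' then total ++ [3]
      else if n = 'v' then total ++ [4]
      else if n = 'w' then total ++ [5]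
      else if n = 'x' then total ++ [6]
      else if n = 'y' then total ++ [7]
      else if n = 'z' then total ++ [8]
      else total) []
  let sumtotal := total.sum
  "Full reduction gematria: " ++ PySem.Int.toStr sumtotal

-- ===== PORT B =====
-- literal port of B: sum of ((ord(c)-97) % 9) + 1 over the characters with 'a' <= c <= 'z'.
def getFullReductionGematria_alt (phrase : String) : String :=
  let total : Int :=
    ((phrase.toList.filter (fun c => decide ('a' ≤ c ∧ c ≤ 'z'))).map
      (fun c => PySem.Int.mod ((c.toNat : Int) - 97) 9 + 1)).sum
  "Full reduction gematria: " ++ PySem.Int.toStr total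

-- ===== PRECONDITION & SPEC =====
def Spec_getFullReductionGematria (phrase : String) (out : String) : Prop := out = getFullReductionGematria_alt phrase
instance (phrase : String) (out : String) : Decidable (Spec_getFullReductionGematria phrase out) := by unfold Spec_getFullReductionGematria; infer_instance

-- ===== CLAIM (what is proved, stated in full; the proofs are below) =====
def Claim_equal_getFullReductionGematria : Prop := ∀ (phrase : String), Dom_getFullReductionGematria phrase → Spec_getFullReductionGematria phrase (getFullReductionGematria phrase)

-- ===== LEMMAS AND PROOFS =====

-- A's elif chain as a per-character list (the list the loop body appends for that character)
def pvGem (n : Char) : List Int :=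
  if n = 'a' then [1] else if n = 'b' then [2] else if n = 'c' then [3]
  else if n = 'd' then [4] else if n = 'e' then [5] else if n = 'f' then [6]
  else if n = 'g' then [7] else if n = 'h' then [8] else if n = 'i' then [9]
  else if n = 'j' then [1] else if n = 'k' then [2] else if n = 'l' then [3]
  else if n = 'm' then [4] else if n = 'n' then [5] else if n = 'o' then [6]
  else if n = 'p' then [7] else if n = 'q' then [8] else if n = 'r' then [9]
  else if n = 's' then [1] else if n = 't' then [2] else if n = 'u' then [3]
  else if n = 'v' then [4] else if n = 'w' then [5] else if n = 'x' then [6]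
  else if n = 'y' then [7] else if n = 'z' then [8] else []

lemma char_eq_iff_toNat (c d : Char) : c = d ↔ c.toNat = d.toNat := by
  constructor
  · intro h; rw [h]
  · intro h
    apply Char.ext
    exact UInt32.toNat_inj.mp h

lemma char_le_iff_toNat (c d : Char) : c ≤ d ↔ c.toNat ≤ d.toNat := by
  rw [Char.le_def]; exact UInt32.le_iff_toNat_le

-- per-character agreement between A's chain and B's closed form
set_option maxHeartbeats 1000000 in
lemma pvGem_sum (c : Char) :
    (pvGem c).sum =
      (if 'a' ≤ c ∧ c ≤ 'z' then PySem.Int.mod ((c.toNat : Int) - 97) 9 + 1 else 0) := by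
  have h9 : (0:Int) < 9 := by norm_num
  rw [PySem.Int.mod_eq_emod_of_pos h9]
  simp only [pvGem, char_eq_iff_toNat, char_le_iff_toNat]
  simp only [show ('a').toNat = 97 from by decide, show ('b').toNat = 98 from by decide, show ('c').toNat = 99 from by decide, show ('d').toNat = 100 from by decide, show ('e').toNat = 101 from by decide, show ('f').toNat = 102 from by decide, show ('g').toNat = 103 from by decide, show ('h').toNat = 104 from by decide, show ('i').toNat = 105 from by decide, show ('j').toNat = 106 from by decide, show ('k').toNat = 107 from by decide, show ('l').toNat = 108 from by decide, show ('m').toNat = 109 from by decide, show ('n').toNat = 110 from by decide, show ('o').toNat = 111 from by decide, show ('p').toNat = 112 from by decide, show ('q').toNat = 113 from by decide, show ('r').toNat = 114 from by decide, show ('s').toNat = 115 from by decide, show ('t').toNat = 116 from by decide, show ('u').toNat = 117 from by decide, show ('v').toNat = 118 from by decide, show ('w').toNat = 119 from by decide, show ('x').toNat = 120 from by decide, show ('y').toNat = 121 from by decide, show ('z').toNat = 122 from by decide]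
  generalize c.toNat = m
  by_cases h0 : m = 97
  · subst h0; decide
  rw [if_neg h0]
  by_cases h1 : m = 98
  · subst h1; decide
  rw [if_neg h1]
  by_cases h2 : m = 99
  · subst h2; decide
  rw [if_neg h2]
  by_cases h3 : m = 100
  · subst h3; decide
  rw [if_neg h3]
  by_cases h4 : m = 101
  · subst h4; decide
  rw [if_neg h4]
  by_cases h5 : m = 102
  · subst h5; decide
  rw [if_neg h5]
  by_cases h6 : m = 103
  · subst h6; decide
  rw [if_neg h6]
  by_cases h7 : m = 104
  · subst h7; decide
  rw [if_neg h7]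
  by_cases h8 : m = 105
  · subst h8; decide
  rw [if_neg h8]
  by_cases h9 : m = 106
  · subst h9; decide
  rw [if_neg h9]
  by_cases h10 : m = 107
  · subst h10; decide
  rw [if_neg h10]
  by_cases h11 : m = 108
  · subst h11; decide
  rw [if_neg h11]
  by_cases h12 : m = 109
  · subst h12; decide
  rw [if_neg h12]
  by_cases h13 : m = 110
  · subst h13; decide
  rw [if_neg h13]
  by_cases h14 : m = 111
  · subst h14; decide
  rw [if_neg h14]
  by_cases h15 : m = 112
  · subst h15; decide
  rw [if_neg h15]
  by_cases h16 : m = 113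
  · subst h16; decide
  rw [if_neg h16]
  by_cases h17 : m = 114
  · subst h17; decide
  rw [if_neg h17]
  by_cases h18 : m = 115
  · subst h18; decide
  rw [if_neg h18]
  by_cases h19 : m = 116
  · subst h19; decide
  rw [if_neg h19]
  by_cases h20 : m = 117
  · subst h20; decide
  rw [if_neg h20]
  by_cases h21 : m = 118
  · subst h21; decide
  rw [if_neg h21]
  by_cases h22 : m = 119
  · subst h22; decide
  rw [if_neg h22]
  by_cases h23 : m = 120
  · subst h23; decide
  rw [if_neg h23]
  by_cases h24 : m = 121
  · subst h24; decide
  rw [if_neg h24]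
  by_cases h25 : m = 122
  · subst h25; decide
  rw [if_neg h25]
  rw [if_neg (by omega : ¬(97 ≤ m ∧ m ≤ 122))]
  decide

-- ===== VERDICT (by name: the statement is the Claim_ definition above) =====
set_option maxHeartbeats 2000000 in
theorem getFullReductionGematria_spec : Claim_equal_getFullReductionGematria := by
  intro phrase _
  unfold Spec_getFullReductionGematria getFullReductionGematria getFullReductionGematria_alt
  have hstep :
      phrase.toList.foldl (fun total n =>
        if n = 'a' then total ++ [1]
        else if n = 'b' then total ++ [2]
        else if n = 'c' then total ++ [3]
        else if n = 'd' then total ++ [4]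
        else if n = 'e' then total ++ [5]
        else if n = 'f' then total ++ [6]
        else if n = 'g' then total ++ [7]
        else if n = 'h' then total ++ [8]
        else if n = 'i' then total ++ [9]
        else if n = 'j' then total ++ [1]
        else if n = 'k' then total ++ [2]
        else if n = 'l' then total ++ [3]
        else if n = 'm' then total ++ [4]
        else if n = 'n' then total ++ [5]
        else if n = 'o' then total ++ [6]
        else if n = 'p' then total ++ [7]
        else if n = 'q' then total ++ [8]
        else if n = 'r' then total ++ [9]
        else if n = 's' then total ++ [1]
        else if n = 't' then total ++ [2]
        else if n = 'u' then total ++ [3]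
        else if n = 'v' then total ++ [4]
        else if n = 'w' then total ++ [5]
        else if n = 'x' then total ++ [6]
        else if n = 'y' then total ++ [7]
        else if n = 'z' then total ++ [8]
        else total) ([] : List Int)
      = phrase.toList.foldl (fun total n => total ++ pvGem n) [] := by
    apply PySem.List.foldl_congr_mem
    intro total n _
    simp only [pvGem]
    by_cases g0 : n = 'a'
    · subst g0; simp
    rw [if_neg g0, if_neg g0]
    by_cases g1 : n = 'b'
    · subst g1; simp
    rw [if_neg g1, if_neg g1]
    by_cases g2 : n = 'c'
    · subst g2; simp
    rw [if_neg g2, if_neg g2]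
    by_cases g3 : n = 'd'
    · subst g3; simp
    rw [if_neg g3, if_neg g3]
    by_cases g4 : n = 'e'
    · subst g4; simp
    rw [if_neg g4, if_neg g4]
    by_cases g5 : n = 'f'
    · subst g5; simp
    rw [if_neg g5, if_neg g5]
    by_cases g6 : n = 'g'
    · subst g6; simp
    rw [if_neg g6, if_neg g6]
    by_cases g7 : n = 'h'
    · subst g7; simp
    rw [if_neg g7, if_neg g7]
    by_cases g8 : n = 'i'
    · subst g8; simp
    rw [if_neg g8, if_neg g8]
    by_cases g9 : n = 'j'
    · subst g9; simp
    rw [if_neg g9, if_neg g9]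
    by_cases g10 : n = 'k'
    · subst g10; simp
    rw [if_neg g10, if_neg g10]
    by_cases g11 : n = 'l'
    · subst g11; simp
    rw [if_neg g11, if_neg g11]
    by_cases g12 : n = 'm'
    · subst g12; simp
    rw [if_neg g12, if_neg g12]
    by_cases g13 : n = 'n'
    · subst g13; simp
    rw [if_neg g13, if_neg g13]
    by_cases g14 : n = 'o'
    · subst g14; simp
    rw [if_neg g14, if_neg g14]
    by_cases g15 : n = 'p'
    · subst g15; simp
    rw [if_neg g15, if_neg g15]
    by_cases g16 : n = 'q'
    · subst g16; simp
    rw [if_neg g16, if_neg g16]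
    by_cases g17 : n = 'r'
    · subst g17; simp
    rw [if_neg g17, if_neg g17]
    by_cases g18 : n = 's'
    · subst g18; simp
    rw [if_neg g18, if_neg g18]
    by_cases g19 : n = 't'
    · subst g19; simp
    rw [if_neg g19, if_neg g19]
    by_cases g20 : n = 'u'
    · subst g20; simp
    rw [if_neg g20, if_neg g20]
    by_cases g21 : n = 'v'
    · subst g21; simp
    rw [if_neg g21, if_neg g21]
    by_cases g22 : n = 'w'
    · subst g22; simp
    rw [if_neg g22, if_neg g22]
    by_cases g23 : n = 'x'
    · subst g23; simp
    rw [if_neg g23, if_neg g23]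
    by_cases g24 : n = 'y'
    · subst g24; simp
    rw [if_neg g24, if_neg g24]
    by_cases g25 : n = 'z'
    · subst g25; simp
    rw [if_neg g25, if_neg g25]
    simp
  simp only [hstep, PySem.List.foldl_append_eq_flatMap, List.nil_append]
  congr 1
  congr 1
  induction phrase.toList with
  | nil => rfl
  | cons c cs ih =>
    simp only [List.flatMap_cons, List.filter_cons, List.sum_append]
    by_cases hc : 'a' ≤ c ∧ c ≤ 'z'
    · simp [hc, pvGem_sum, ih]
    · simp [hc, pvGem_sum, ih]
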